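-- pv_equiv track=rewrite | github.com/pygfx/pygfx | pygfx/resources/_utils.py | get_alignment_multiplier
-- ===== SOURCE A (Python) =====
-- from math import ceil, log2
--
-- def get_alignment_multiplier(bytes_per_element=1, align=16):
--     bytes_per_element = bytes_per_element or 1
--     factor_max = log2(align)
--     if not factor_max.is_integer():
--         raise ValueError("align must be factor of two")
--     for factor in range(int(factor_max) + 1):
--         mult = 2**factor
--         extra = (mult * bytes_per_element) % align
--         if not extra:
--             return mult
-- ===== SOURCE B (Python) =====
-- from math import gcd, log2
--
-- def get_alignment_multiplier(bytes_per_element=1, align=16):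
--     bytes_per_element = bytes_per_element or 1
--     if not log2(align).is_integer():
--         raise ValueError("align must be factor of two")
--     return align // gcd(align, bytes_per_element)
-- ===== Notes on version B (the rewrite author's own statement) =====
-- stated objective: simpler
-- what changed: Replaces the loop over candidate power-of-two factors with a closed-form answer align // gcd(align, bytes_per_element), keeping the same power-of-two check on align.
import Mathlib
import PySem

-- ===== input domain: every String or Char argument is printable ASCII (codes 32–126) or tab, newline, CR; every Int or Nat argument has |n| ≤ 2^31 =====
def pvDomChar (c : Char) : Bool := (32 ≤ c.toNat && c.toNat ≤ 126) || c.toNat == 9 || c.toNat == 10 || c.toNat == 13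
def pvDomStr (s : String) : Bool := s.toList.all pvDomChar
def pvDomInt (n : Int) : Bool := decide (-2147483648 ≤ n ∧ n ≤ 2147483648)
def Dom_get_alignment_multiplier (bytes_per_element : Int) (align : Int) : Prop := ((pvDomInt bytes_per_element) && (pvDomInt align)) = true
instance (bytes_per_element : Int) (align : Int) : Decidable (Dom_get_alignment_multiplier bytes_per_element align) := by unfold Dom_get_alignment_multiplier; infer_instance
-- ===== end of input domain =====

-- B replaces A's first-fit loop over power-of-two factors by the closed form
-- align // gcd(align, bytes_per_element) (objective: simpler).

-- ===== PORT A =====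
-- 'for factor in range(int(factor_max)+1): … return mult' = find? over the range;
-- outside Pre_ (align not a positive power of two) Python raises, the port returns 0.
def get_alignment_multiplier (bytes_per_element : Int) (align : Int) : Int :=
  let b := if bytes_per_element = 0 then 1 else bytes_per_element
  if 0 < align then
    let k := align.toNat.log2          -- int(log2(align)) when the check below passes
    if (2 : Int) ^ k = align then      -- factor_max.is_integer()
      match (List.range (k + 1)).find?
          (fun f => PySem.Int.mod ((2 : Int) ^ f * b) align == 0) with
      | some f => (2 : Int) ^ f
      | none => 0
    else 0                             -- raise ValueError
  else 0                               -- log2 domain error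

-- ===== PORT B =====
def get_alignment_multiplier_alt (bytes_per_element : Int) (align : Int) : Int :=
  let b := if bytes_per_element = 0 then 1 else bytes_per_element
  if 0 < align ∧ (2 : Int) ^ align.toNat.log2 = align then
    PySem.Int.floordiv align (Int.gcd align b)
  else 0                               -- raise ValueError

-- ===== PRECONDITION & SPEC =====
-- Pre_ excludes exactly the inputs where Python A raises: align must be a positive power of two
-- (log2 raises a ValueError on align ≤ 0, and A raises ValueError when log2(align) is not integral).
def Pre_get_alignment_multiplier (bytes_per_element : Int) (align : Int) : Prop :=
  0 < align ∧ (2 : Int) ^ align.toNat.log2 = align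
instance (bytes_per_element : Int) (align : Int) : Decidable (Pre_get_alignment_multiplier bytes_per_element align) := by unfold Pre_get_alignment_multiplier; infer_instance
def pvWitness_get_alignment_multiplier : Int × Int := (3, 16)

def Spec_get_alignment_multiplier (bytes_per_element : Int) (align : Int) (out : Int) : Prop := out = get_alignment_multiplier_alt bytes_per_element align
instance (bytes_per_element : Int) (align : Int) (out : Int) : Decidable (Spec_get_alignment_multiplier bytes_per_element align out) := by unfold Spec_get_alignment_multiplier; infer_instance

-- ===== CLAIM (what is proved, stated in full; the proofs are below) =====
def Claim_equal_get_alignment_multiplier : Prop := ∀ (bytes_per_element : Int) (align : Int), Dom_get_alignment_multiplier bytes_per_element align → Pre_get_alignment_multiplier bytes_per_element align → Spec_get_alignment_multiplier bytes_per_element align (get_alignment_multiplier bytes_per_element align)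

-- ===== LEMMAS AND PROOFS =====

-- first index ≥ t in range (k+1) is t
theorem find_range_threshold (p : Nat → Bool) (t k : Nat) (ht : t ≤ k)
    (hp : ∀ f, p f = true ↔ t ≤ f) :
    (List.range (k + 1)).find? p = some t := by
  have hsplit : k + 1 = t + (k + 1 - t) := by omega
  rw [hsplit, List.range_add, List.find?_append]
  have h1 : (List.range t).find? p = none := by
    rw [List.find?_eq_none]
    intro x hx
    simp only [List.mem_range] at hx
    simp [hp x]; omega
  rw [h1]
  have h2 : 0 < k + 1 - t := by omega
  obtain ⟨j, hj⟩ : ∃ j, k + 1 - t = j + 1 := ⟨k - t, by omega⟩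
  rw [hj, List.range_succ_eq_map]
  simp [(hp t).mpr le_rfl]

-- divisibility by 2^k through the gcd: 2^k ∣ 2^f * n ↔ k - m ≤ f where gcd(2^k, n) = 2^m
theorem pow_dvd_mul_iff (k m f n : Nat) (hn : 0 < n) (hm : m ≤ k)
    (hg : Nat.gcd (2 ^ k) n = 2 ^ m) :
    (2 ^ k ∣ 2 ^ f * n ↔ k - m ≤ f) := by
  constructor
  · intro hdvd
    by_cases hmk : m = k
    · omega
    · -- n = 2^m * n' with n' odd
      have hmn : 2 ^ m ∣ n := hg ▸ Nat.gcd_dvd_right _ _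
      obtain ⟨n', hn'⟩ := hmn
      have hodd : ¬ 2 ∣ n' := by
        intro ⟨c, hc⟩
        have : 2 ^ (m + 1) ∣ Nat.gcd (2 ^ k) n := by
          refine Nat.dvd_gcd (pow_dvd_pow 2 (by omega)) ?_
          exact ⟨c, by rw [hn', hc]; ring⟩
        rw [hg] at this
        have := Nat.le_of_dvd (by positivity) this
        have := Nat.pow_lt_pow_right (by omega : 1 < 2) (Nat.lt_succ_self m)
        omega
      have hcop : Nat.Coprime (2 ^ (k - m)) n' := by
        refine Nat.Coprime.pow_left _ ?_
        exact (Nat.Prime.coprime_iff_not_dvd Nat.prime_two).mpr hodd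
      have : 2 ^ k ∣ 2 ^ f * 2 ^ m * n' := by
        rw [show 2 ^ f * 2 ^ m * n' = 2 ^ f * (2 ^ m * n') by ring, ← hn']; exact hdvd
      have hk : 2 ^ (k - m) * 2 ^ m ∣ 2 ^ f * 2 ^ m * n' := by
        rwa [← pow_add, Nat.sub_add_cancel hm]
      have h2 : 2 ^ (k - m) ∣ 2 ^ f * n' := by
        rcases hk with ⟨c, hc⟩
        refine ⟨c, ?_⟩
        have h2m : 0 < 2 ^ m := by positivity
        apply Nat.eq_of_mul_eq_mul_right h2m
        calc 2 ^ f * n' * 2 ^ m = 2 ^ f * 2 ^ m * n' := by ring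
          _ = 2 ^ (k - m) * 2 ^ m * c := hc
          _ = 2 ^ (k - m) * c * 2 ^ m := by ring
      have h3 : 2 ^ (k - m) ∣ 2 ^ f := (Nat.Coprime.dvd_of_dvd_mul_right hcop) h2
      have := (Nat.pow_dvd_pow_iff_le_right (by omega : 1 < 2)).mp h3
      omega
  · intro hle
    have h1 : 2 ^ (k - m) ∣ 2 ^ f := pow_dvd_pow 2 hle
    have h2 : 2 ^ m ∣ n := hg ▸ Nat.gcd_dvd_right _ _
    have := mul_dvd_mul h1 h2
    rwa [← pow_add, Nat.sub_add_cancel hm] at this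

-- ===== VERDICT (by name: the statement is the Claim_ definition above) =====
theorem get_alignment_multiplier_spec : Claim_equal_get_alignment_multiplier := by
  intro bpe align _ hpre
  obtain ⟨hpos, hpow⟩ := hpre
  unfold Spec_get_alignment_multiplier get_alignment_multiplier get_alignment_multiplier_alt
  simp only [if_pos hpos, if_pos hpow, if_pos (And.intro hpos hpow)]
  set b : Int := if bpe = 0 then 1 else bpe with hb
  have hbne : b ≠ 0 := by
    rw [hb]; split_ifs with h
    · exact one_ne_zero
    · exact h
  set k := align.toNat.log2 with hk
  have halign : align.toNat = 2 ^ k := by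
    have : ((2 : Int) ^ k).toNat = align.toNat := by rw [hpow]
    simpa using this.symm
  have hAbs : align.natAbs = 2 ^ k := by omega
  set n := b.natAbs with hn
  have hnpos : 0 < n := Int.natAbs_pos.mpr hbne
  obtain ⟨m, hm, hgm⟩ := (Nat.dvd_prime_pow Nat.prime_two).mp
    (Nat.gcd_dvd_left (2 ^ k) n)
  have hgcd : Int.gcd align b = 2 ^ m := by
    rw [Int.gcd, hAbs, ← hn, hgm]
  have hfind : (List.range (k + 1)).find?
      (fun f => PySem.Int.mod ((2 : Int) ^ f * b) align == 0) = some (k - m) := by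
    apply find_range_threshold _ _ _ (by omega)
    intro f
    simp only [beq_iff_eq, PySem.Int.mod_eq_zero_iff_dvd]
    rw [← Int.natAbs_dvd_natAbs, Int.natAbs_mul, Int.natAbs_pow, hAbs,
      show (2 : Int).natAbs = 2 from rfl, ← hn]
    exact pow_dvd_mul_iff k m f n hnpos hm hgm
  rw [hfind, hgcd]
  have e3 : ((2 ^ m : Nat) : Int) = (2 : Int) ^ m := by push_cast; rfl
  rw [e3, ← hpow, PySem.Int.floordiv_eq_ediv_of_pos (by positivity)]
  rw [show (2 : Int) ^ k = (2 : Int) ^ (k - m) * 2 ^ m by rw [← pow_add, Nat.sub_add_cancel hm]]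
  rw [Int.mul_ediv_cancel _ (by positivity)]
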